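-- pv_equiv track=rewrite | github.com/PatrickRose/advent-of-code | python/2019/DayFour.py | meets_criteria_two
-- ===== SOURCE A (Python) =====
-- def meets_criteria_two(number):
--     number = str(number)
--     last_number = 0
--     hit_double = False
--
--     for i in number:
--         if int(i) < last_number:
--             return False
--
--         last_number = int(i)
--
--     doubleCount = {}
--
--     for i in range(10):
--         doubleCount[str(i)] = 0
--
--     last_number = number[:1]
--
--     for i in number[1:]:
--         if i == last_number:
--             doubleCount[i] += 1
--         else:
--             last_number = i
--
--
--     return 1 in doubleCount.values()
-- ===== SOURCE B (Python) =====
-- def meets_criteria_two(number):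
--     s = str(number)
--     if list(s) != sorted(s):
--         return False
--     runs = []
--     for c in s:
--         if runs and runs[-1][0] == c:
--             runs[-1][1] += 1
--         else:
--             runs.append([c, 1])
--     return any(n == 2 for _, n in runs)
-- ===== Notes on version B (the rewrite author's own statement) =====
-- stated objective: idiomatic
-- what changed: B replaces A's two hand-rolled passes (digit-by-digit int() comparison loop plus a zero-initialized per-digit dict counting repeats) with a sortedness check (list(s) == sorted(s)) followed by a run-length encoding of the string, returning whether any maximal run has length exactly 2.
import Mathlib
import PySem

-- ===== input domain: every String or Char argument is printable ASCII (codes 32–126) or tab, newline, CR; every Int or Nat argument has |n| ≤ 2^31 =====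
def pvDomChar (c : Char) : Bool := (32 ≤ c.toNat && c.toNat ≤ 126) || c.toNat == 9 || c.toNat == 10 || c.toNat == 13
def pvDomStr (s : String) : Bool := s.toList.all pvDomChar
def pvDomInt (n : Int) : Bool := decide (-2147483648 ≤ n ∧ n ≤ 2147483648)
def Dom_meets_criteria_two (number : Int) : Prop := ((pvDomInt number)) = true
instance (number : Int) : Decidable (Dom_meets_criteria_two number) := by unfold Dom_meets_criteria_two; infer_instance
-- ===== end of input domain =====

-- B (idiomatic): replaces A's two hand-rolled passes (digit comparison loop + per-digit dict of
-- repeat counts) by a sortedness check followed by a run-length encoding.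

-- ===== PORT A =====
-- first loop: for i in number: if int(i) < last_number: return False; last_number = int(i)
-- (int(i) raising ValueError — non-digit char — is the 'none' branch, excluded by Pre_)
def aLoop1 : List Char → Int → Bool
  | [], _ => true
  | c :: rest, last =>
    match PySem.Int.ofChars? [c] with
    | none => false
    | some v => if v < last then false else aLoop1 rest v

-- second loop over number[1:], tracking last_number (a string, here a char list) and the dict
-- (doubleCount[i] += 1 is modify with default 0; inside Pre_ the key is always present, as in Python)
def aLoop2 : List Char → List Char → PySem.Dict (List Char) Int → PySem.Dict (List Char) Int
  | [], _, d => d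
  | c :: rest, last, d =>
    if [c] = last then aLoop2 rest last (PySem.Dict.modify d [c] 0 (· + 1))
    else aLoop2 rest [c] d

def meets_criteria_two (number : Int) : Bool :=
  let cs := PySem.Int.toChars number
  if aLoop1 cs 0 then
    let d0 := (PySem.List.pyRange 0 10 1).foldl
      (fun d i => PySem.Dict.insert d (PySem.Int.toChars i) 0) PySem.Dict.empty
    let d := aLoop2 (PySem.List.slice cs (some 1) none) (PySem.List.slice cs none (some 1)) d0
    decide ((1 : Int) ∈ PySem.Dict.values d)
  else false

-- ===== PORT B =====
-- one step of the run-building loop: extend the last run or append a fresh [c, 1]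
def bStep (runs : List (Char × Int)) (c : Char) : List (Char × Int) :=
  match runs.getLast? with
  | some (c0, n) => if c0 = c then runs.dropLast ++ [(c0, n + 1)] else runs ++ [(c, 1)]
  | none => runs ++ [(c, 1)]

def meets_criteria_two_alt (number : Int) : Bool :=
  let cs := (PySem.Int.toStr number).toList
  if cs ≠ PySem.List.sorted cs (fun x => x) false then false
  else (cs.foldl bStep []).any (fun p => p.2 == 2)

-- ===== PRECONDITION & SPEC =====
-- A raises ValueError on every negative number (int('-')); Pre_ keeps the non-negative ones.
def Pre_meets_criteria_two (number : Int) : Prop := 0 ≤ number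
instance (number : Int) : Decidable (Pre_meets_criteria_two number) := by
  unfold Pre_meets_criteria_two; infer_instance
def pvWitness_meets_criteria_two : Int := 122

def Spec_meets_criteria_two (number : Int) (out : Bool) : Prop := out = meets_criteria_two_alt number
instance (number : Int) (out : Bool) : Decidable (Spec_meets_criteria_two number out) := by
  unfold Spec_meets_criteria_two; infer_instance

-- ===== CLAIM (what is proved, stated in full; the proofs are below) =====
def Claim_equal_meets_criteria_two : Prop := ∀ (number : Int), Dom_meets_criteria_two number → Pre_meets_criteria_two number → Spec_meets_criteria_two number (meets_criteria_two number)

-- ===== LEMMAS AND PROOFS =====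


def DIGITS : List Char := ['0','1','2','3','4','5','6','7','8','9']
def dval (c : Char) : Int := (c.toNat : Int) - 48

lemma ofChars_digit {c : Char} (h : c ∈ DIGITS) : PySem.Int.ofChars? [c] = some (dval c) := by
  fin_cases h <;> decide

lemma dig_le {c d : Char} (hc : c ∈ DIGITS) (hd : d ∈ DIGITS) : c ≤ d ↔ dval c ≤ dval d := by
  fin_cases hc <;> fin_cases hd <;> decide

lemma dval_nonneg {c : Char} (h : c ∈ DIGITS) : 0 ≤ dval c := by fin_cases h <;> decide

lemma digitChar_mem (n : Nat) (h : n < 10) : Nat.digitChar n ∈ DIGITS := by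
  interval_cases n <;> decide

lemma toDigitsCore_digits : ∀ (fuel n : Nat) (acc : List Char),
    (∀ c ∈ acc, c ∈ DIGITS) → ∀ c ∈ Nat.toDigitsCore 10 fuel n acc, c ∈ DIGITS := by
  intro fuel
  induction fuel with
  | zero => intro n acc hacc; simpa [Nat.toDigitsCore] using hacc
  | succ f ih =>
    intro n acc hacc c hc
    simp only [Nat.toDigitsCore] at hc
    split at hc
    · rcases List.mem_cons.mp hc with h | h
      · subst h; exact digitChar_mem _ (Nat.mod_lt _ (by norm_num))
      · exact hacc _ h
    · exact ih _ _ (by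
        intro x hx
        rcases List.mem_cons.mp hx with h | h
        · subst h; exact digitChar_mem _ (Nat.mod_lt _ (by norm_num))
        · exact hacc _ h) c hc

lemma toDigitsCore_ne_nil : ∀ (fuel n : Nat) (acc : List Char),
    (fuel ≠ 0 ∨ acc ≠ []) → Nat.toDigitsCore 10 fuel n acc ≠ [] := by
  intro fuel
  induction fuel with
  | zero => intro n acc h; simp only [Nat.toDigitsCore]; tauto
  | succ f ih =>
    intro n acc h
    simp only [Nat.toDigitsCore]
    split
    · simp
    · exact ih _ _ (Or.inr (by simp))

lemma toChars_digits {n : Int} (h : 0 ≤ n) : ∀ c ∈ PySem.Int.toChars n, c ∈ DIGITS := by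
  unfold PySem.Int.toChars
  rw [if_neg (by omega)]
  exact toDigitsCore_digits _ _ _ (by simp [Nat.toDigits])

lemma toChars_ne_nil {n : Int} (h : 0 ≤ n) : PySem.Int.toChars n ≠ [] := by
  unfold PySem.Int.toChars
  rw [if_neg (by omega)]
  exact toDigitsCore_ne_nil _ _ _ (Or.inl (by simp [Nat.toDigits]))





lemma aLoop1_iff : ∀ (cs : List Char) (last : Int), (∀ c ∈ cs, c ∈ DIGITS) →
    (aLoop1 cs last = true ↔ List.IsChain (· ≤ ·) (last :: cs.map dval)) := by
  intro cs
  induction cs with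
  | nil => intro last _; simp [aLoop1]
  | cons c rest ih =>
    intro last hd
    have hc : c ∈ DIGITS := hd c (by simp)
    simp only [aLoop1, ofChars_digit hc, List.map_cons, List.isChain_cons_cons]
    by_cases h : dval c < last
    · simp only [if_pos h]
      constructor
      · intro hfalse; cases hfalse
      · rintro ⟨h1, -⟩; omega
    · simp only [if_neg h]
      rw [ih (dval c) (fun x hx => hd x (by simp [hx]))]
      constructor
      · intro hch; exact ⟨by omega, hch⟩
      · rintro ⟨-, hch⟩; exact hch

lemma phase1_iff (cs : List Char) (hd : ∀ c ∈ cs, c ∈ DIGITS) :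
    aLoop1 cs 0 = true ↔ cs.Pairwise (· ≤ ·) := by
  rw [aLoop1_iff cs 0 hd, List.isChain_iff_pairwise, List.pairwise_cons, List.pairwise_map]
  constructor
  · intro ⟨_, hp⟩
    exact hp.imp_of_mem (fun ha hb h => (dig_le (hd _ ha) (hd _ hb)).mpr h)
  · intro hp
    refine ⟨fun x hx => ?_, hp.imp_of_mem (fun ha hb h => (dig_le (hd _ ha) (hd _ hb)).mp h)⟩
    rcases List.mem_map.mp hx with ⟨c, hc, rfl⟩
    exact dval_nonneg (hd _ hc)

lemma sorted_self_iff (cs : List Char) :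
    cs = PySem.List.sorted cs (fun x => x) false ↔ cs.Pairwise (· ≤ ·) := by
  constructor
  · intro h
    have := PySem.List.sorted_pairwise cs (fun x : Char => x)
    rw [← h] at this
    exact this
  · intro h
    exact (PySem.List.sorted_eq_self_of_pairwise cs (fun x => x) h).symm


def eqSeconds (cs : List Char) : List Char :=
  ((cs.zip (cs.drop 1)).filter (fun p => decide (p.1 = p.2))).map Prod.snd

lemma aLoop2_eq : ∀ (rest : List Char) (c0 : Char) (d : PySem.Dict (List Char) Int),
    aLoop2 rest [c0] d = ((c0 :: rest).zip rest).foldl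
      (fun d p => if p.1 = p.2 then PySem.Dict.modify d [p.2] 0 (· + 1) else d) d := by
  intro rest
  induction rest with
  | nil => intro c0 d; simp [aLoop2]
  | cons c rest' ih =>
    intro c0 d
    simp only [aLoop2, List.zip_cons_cons, List.foldl_cons]
    by_cases h : c = c0
    · subst h
      rw [if_pos rfl, if_pos rfl, ih]
    · rw [if_neg (by simpa using h), if_neg (by simpa using (Ne.symm h)), ih]

lemma mem_eqSeconds {cs : List Char} {x : Char} (h : x ∈ eqSeconds cs) : x ∈ cs.drop 1 := by
  unfold eqSeconds at h
  rcases List.mem_map.mp h with ⟨p, hp, rfl⟩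
  exact List.of_mem_zip (List.mem_of_mem_filter hp) |>.2

lemma count_eqSeconds : ∀ (cs : List Char), cs.Pairwise (· ≤ ·) →
    ∀ k, cs.count k = (eqSeconds cs).count k + (if k ∈ cs then 1 else 0) := by
  intro cs
  induction cs with
  | nil => intro _ k; simp [eqSeconds]
  | cons c0 tl ih =>
    intro hp k
    have htl : tl.Pairwise (· ≤ ·) := hp.of_cons
    cases tl with
    | nil =>
      by_cases h : k = c0
      · simp [eqSeconds, h]
      · simp only [eqSeconds]
        simp [h, List.count_singleton, List.count_eq_zero]
        exact fun e => h e.symm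
    | cons c1 rest =>
      have heq : eqSeconds (c0 :: c1 :: rest) =
          (if c0 = c1 then [c1] else []) ++ eqSeconds (c1 :: rest) := by
        simp only [eqSeconds, List.drop_succ_cons, List.drop_zero, List.zip_cons_cons,
          List.filter_cons]
        by_cases h : c0 = c1 <;> simp [h]
      have ihk := ih htl k
      rw [heq]
      by_cases hk : k = c0
      · subst hk
        by_cases h01 : k = c1
        · subst h01
          simp only [List.count_cons_self, ihk, List.count_append]
          simp [List.mem_cons]
          omega
        · -- k = c0 ≠ c1 : sorted ⇒ k ∉ c1 :: rest
          have hknot : k ∉ c1 :: rest := by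
            intro hmem
            rcases List.mem_cons.mp hmem with h | h
            · exact h01 h
            · -- k ∈ rest; from Pairwise: k ≤ c1 and c1 ≤ k
              have h1 : k ≤ c1 := (List.pairwise_cons.mp hp).1 c1 (by simp)
              have h2 : c1 ≤ k := (List.pairwise_cons.mp htl).1 k h
              exact h01 (le_antisymm h1 h2)
          have hcnt0 : (c1 :: rest).count k = 0 := List.count_eq_zero.mpr hknot
          have hes0 : (eqSeconds (c1 :: rest)).count k = 0 := by
            apply List.count_eq_zero.mpr
            intro hmem
            exact hknot (List.mem_of_mem_drop (mem_eqSeconds hmem))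
          simp only [List.count_cons_self, List.count_append, hes0, hcnt0] at *
          simp [h01, hknot]
      · -- k ≠ c0
        have hne : c0 ≠ k := Ne.symm hk
        simp only [List.count_cons_of_ne hne, List.count_append, ihk, List.mem_cons]
        by_cases h01 : c0 = c1
        · subst h01
          simp [hne]
        · simp [h01, hk]


def mergeRle (p : Char × Int) (r : List (Char × Int)) : List (Char × Int) :=
  match r with
  | (c, m) :: t => if c = p.1 then (p.1, p.2 + m) :: t else p :: r
  | [] => [p]

def rle : List Char → List (Char × Int)
  | [] => []
  | c :: rest => mergeRle (c, 1) (rle rest)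

lemma merge_merge (c0 : Char) (n : Int) (r : List (Char × Int)) :
    mergeRle (c0, n) (mergeRle (c0, 1) r) = mergeRle (c0, n + 1) r := by
  cases r with
  | nil => simp [mergeRle]
  | cons p t =>
    obtain ⟨c, m⟩ := p
    by_cases h : c = c0
    · subst h
      simp [mergeRle]
      omega
    · simp [mergeRle, h]

lemma mergeRle_ne_head {c0 c : Char} (h : c ≠ c0) (n k : Int) (r : List (Char × Int)) :
    mergeRle (c0, n) (mergeRle (c, k) r) = (c0, n) :: mergeRle (c, k) r := by
  cases r with
  | nil => simp [mergeRle, h]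
  | cons p t =>
    obtain ⟨c', m⟩ := p
    by_cases h' : c' = c <;> simp [mergeRle, h', h]

lemma foldl_bStep_merge : ∀ (cs : List Char) (pre : List (Char × Int)) (c0 : Char) (n : Int),
    cs.foldl bStep (pre ++ [(c0, n)]) = pre ++ mergeRle (c0, n) (rle cs) := by
  intro cs
  induction cs with
  | nil => intro pre c0 n; simp [mergeRle, rle]
  | cons c rest ih =>
    intro pre c0 n
    simp only [List.foldl_cons]
    have hb : bStep (pre ++ [(c0, n)]) c =
        if c0 = c then pre ++ [(c0, n + 1)] else (pre ++ [(c0, n)]) ++ [(c, 1)] := by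
      simp [bStep, List.getLast?_concat, List.dropLast_concat]
    by_cases h : c0 = c
    · subst h
      rw [hb, if_pos rfl, ih, rle, merge_merge]
    · rw [hb, if_neg h, ih, rle, mergeRle_ne_head (fun e => h e.symm)]
      simp

lemma runs_eq (cs : List Char) : cs.foldl bStep [] = rle cs := by
  cases cs with
  | nil => rfl
  | cons c rest =>
    have h0 : bStep [] c = [] ++ [(c, 1)] := by simp [bStep]
    simp only [List.foldl_cons, h0]
    simpa [rle] using foldl_bStep_merge rest [] c 1

lemma rle_head : ∀ (c : Char) (rest : List Char), ∃ n t, rle (c :: rest) = (c, n) :: t := by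
  intro c rest
  show ∃ n t, mergeRle (c, 1) (rle rest) = (c, n) :: t
  cases h : rle rest with
  | nil => exact ⟨1, [], by simp [mergeRle]⟩
  | cons p t =>
    obtain ⟨c', m⟩ := p
    by_cases h' : c' = c
    · exact ⟨1 + m, t, by simp [mergeRle, h']⟩
    · exact ⟨1, (c', m) :: t, by simp [mergeRle, h']⟩

lemma rle_spec : ∀ (cs : List Char), cs.Pairwise (· ≤ ·) →
    ((rle cs).map Prod.fst).Nodup ∧ (∀ x, x ∈ (rle cs).map Prod.fst ↔ x ∈ cs) ∧
      (∀ p ∈ rle cs, p.2 = (cs.count p.1 : Int)) := by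
  intro cs
  induction cs with
  | nil => intro _; simp [rle]
  | cons c rest ih =>
    intro hp
    have htl := hp.of_cons
    obtain ⟨hnd, hmem, hcnt⟩ := ih htl
    have hcnotin : c ∉ rest → rest.count c = 0 := fun h => List.count_eq_zero.mpr h
    cases hr : rle rest with
    | nil =>
      -- rle rest = [] → rest = [] (via hmem: nothing is in rest)
      have hrest : rest = [] := by
        cases rest with
        | nil => rfl
        | cons a b =>
          exfalso
          have := (hmem a).mpr (by simp)
          rw [hr] at this
          simp at this
      subst hrest
      simp [rle, mergeRle]
    | cons p t =>
      obtain ⟨c', m⟩ := p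
      -- c' is the head char of rest
      have hc'head : ∃ rest' , rest = c' :: rest' := by
        cases rest with
        | nil => simp [rle] at hr
        | cons a b =>
          obtain ⟨n', t', hh⟩ := rle_head a b
          rw [hr] at hh
          cases hh
          exact ⟨b, rfl⟩
      obtain ⟨rest', rfl⟩ := hc'head
      rw [hr] at hnd hmem hcnt
      show _ ∧ _ ∧ _
      by_cases h : c = c'
      · -- extend the first run
        subst h
        have hmerge : rle (c :: c :: rest') = (c, 1 + m) :: t := by
          simp only [rle] at hr ⊢
          rw [hr]
          simp [mergeRle]
        rw [hmerge]
        refine ⟨?_, ?_, ?_⟩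
        · simpa using hnd
        · intro x
          have := hmem x
          simp only [List.map_cons, List.mem_cons] at this ⊢
          tauto
        · intro p hp'
          rcases List.mem_cons.mp hp' with rfl | hp''
          · have := hcnt (c, m) (by simp)
            simp at this
            simp [List.count_cons_self, this]
            omega
          · have h1 := hcnt p (by simp [hp''])
            have hpne : p.1 ≠ c := by
              intro e
              have : p.1 ∈ (((c, m) :: t).map Prod.fst) := by
                simp only [List.map_cons]
                exact List.mem_cons_of_mem _ (List.mem_map.mpr ⟨p, hp'', rfl⟩)
              simp only [List.map_cons, List.nodup_cons] at hnd
              exact hnd.1 (by rw [← e]; exact List.mem_map.mpr ⟨p, hp'', rfl⟩)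
            rw [List.count_cons_of_ne (Ne.symm hpne)]
            exact h1
      · -- new run (c, 1)
        have hcnotmem : c ∉ c' :: rest' := by
          intro hmem'
          rcases List.mem_cons.mp hmem' with e | hin
          · exact h e
          · have h1 : c ≤ c' := (List.pairwise_cons.mp hp).1 c' (by simp)
            have h2 : c' ≤ c := (List.pairwise_cons.mp htl).1 c hin
            exact h (le_antisymm h2 h1).symm
        have hmerge : rle (c :: c' :: rest') = (c, 1) :: (c', m) :: t := by
          simp only [rle] at hr ⊢
          rw [hr]
          simp [mergeRle, Ne.symm h]
        rw [hmerge]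
        refine ⟨?_, ?_, ?_⟩
        · simp only [List.map_cons, List.nodup_cons] at hnd ⊢
          refine ⟨?_, hnd⟩
          intro hin
          apply hcnotmem
          exact (hmem c).mp (by simpa using hin)
        · intro x
          have := hmem x
          simp only [List.map_cons, List.mem_cons] at this ⊢
          tauto
        · intro p hp'
          rcases List.mem_cons.mp hp' with rfl | hp''
          · simp [List.count_cons_self, hcnotin]
            exact List.count_eq_zero.mpr hcnotmem
          · have h1 := hcnt p hp''
            have hpmem : p.1 ∈ c' :: rest' := (hmem p.1).mp (List.mem_map.mpr ⟨p, hp'', rfl⟩)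
            have hpne : p.1 ≠ c := fun e => hcnotmem (e ▸ hpmem)
            rw [List.count_cons_of_ne (Ne.symm hpne)]
            exact h1

lemma bridge (cs : List Char) (hd : ∀ c ∈ cs, c ∈ DIGITS) (hp : cs.Pairwise (· ≤ ·)) :
    (∃ c ∈ DIGITS, (eqSeconds cs).count c = 1) ↔ (∃ p ∈ rle cs, p.2 = (2 : Int)) := by
  obtain ⟨hnd, hmem, hcnt⟩ := rle_spec cs hp
  constructor
  · rintro ⟨c, hcD, hc1⟩
    have hcs := count_eqSeconds cs hp c
    have hin : c ∈ cs := by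
      by_contra hnin
      have h0 : (eqSeconds cs).count c = 0 :=
        List.count_eq_zero.mpr (fun hm => hnin (List.mem_of_mem_drop (mem_eqSeconds hm)))
      rw [h0] at hcs
      simp [hnin] at hcs
      exact hnin (List.count_pos_iff.mp (by omega))
    have h2 : cs.count c = 2 := by rw [hcs, hc1]; simp [hin]
    obtain ⟨p, hpmem, hfst⟩ := List.mem_map.mp ((hmem c).mpr hin)
    refine ⟨p, hpmem, ?_⟩
    rw [hcnt p hpmem, hfst, h2]
    norm_num
  · rintro ⟨p, hpmem, h2⟩
    have hfst : p.1 ∈ cs := (hmem p.1).mp (List.mem_map.mpr ⟨p, hpmem, rfl⟩)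
    have hc2 : cs.count p.1 = 2 := by
      have h := hcnt p hpmem
      rw [h2] at h
      exact_mod_cast h.symm
    have hcs := count_eqSeconds cs hp p.1
    refine ⟨p.1, hd _ hfst, ?_⟩
    rw [hc2] at hcs
    simp [hfst] at hcs
    omega

lemma pvSetUpdate_subset {α : Type} [BEq α] [LawfulBEq α] :
    ∀ (l : List α) (s : PySem.Set α), (∀ x ∈ l, x ∈ s) → PySem.Set.update s l = s := by
  intro l
  induction l with
  | nil => intro s _; rfl
  | cons x xs ih =>
    intro s h
    show (x :: xs).foldl PySem.Set.add s = s
    rw [List.foldl_cons, PySem.Set.add_of_mem (h x (by simp))]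
    exact ih s (fun y hy => h y (by simp [hy]))

def pvD0 : PySem.Dict (List Char) Int :=
  (PySem.List.pyRange 0 10 1).foldl
    (fun d i => PySem.Dict.insert d (PySem.Int.toChars i) 0) PySem.Dict.empty

lemma pvD0_eq : pvD0 = PySem.Dict.mk
    [(['0'],0),(['1'],0),(['2'],0),(['3'],0),(['4'],0),
     (['5'],0),(['6'],0),(['7'],0),(['8'],0),(['9'],0)] := by
  rfl

lemma pvD0_keys : pvD0.keys = DIGITS.map (fun c => [c]) := by rw [pvD0_eq]; rfl

lemma pvD0_keys_nodup : pvD0.keys.Nodup := by rw [pvD0_keys]; decide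

lemma pvD0_getD : ∀ c ∈ DIGITS, pvD0.getD [c] 0 = 0 := by
  intro c hc; rw [pvD0_eq]; fin_cases hc <;> rfl

-- ===== VERDICT (by name: the statement is the Claim_ definition above) =====
theorem meets_criteria_two_spec : Claim_equal_meets_criteria_two := by
  intro number hdom hpre
  unfold Spec_meets_criteria_two
  unfold Pre_meets_criteria_two at hpre
  have hd := toChars_digits hpre
  have hne := toChars_ne_nil hpre
  unfold meets_criteria_two meets_criteria_two_alt
  rw [PySem.Int.toList_toStr]
  set cs := PySem.Int.toChars number with hcs
  by_cases hsort : cs.Pairwise (· ≤ ·)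
  · -- sorted digits: both go to phase 2
    rw [if_pos ((phase1_iff cs hd).mpr hsort),
        if_neg (show ¬ cs ≠ PySem.List.sorted cs (fun x => x) false from
          fun h => h ((sorted_self_iff cs).mpr hsort))]
    obtain ⟨c0, rest, hcons⟩ : ∃ c0 rest, cs = c0 :: rest := by
      cases h : cs with
      | nil => exact absurd h hne
      | cons a b => exact ⟨a, b, rfl⟩
    rw [Bool.eq_iff_iff]
    rw [hcons] at hsort hd ⊢
    rw [PySem.List.slice_from_one, PySem.List.slice_to _ (by norm_num)]
    show (decide ((1 : Int) ∈ PySem.Dict.values (aLoop2 ((c0 :: rest).tail) (List.take (1:Int).toNat (c0 :: rest)) pvD0)) = true) ↔ _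
    have htake : List.take (1:Int).toNat (c0 :: rest) = [c0] := by simp
    rw [htake]
    show (decide ((1 : Int) ∈ PySem.Dict.values (aLoop2 rest [c0] pvD0)) = true) ↔ _
    rw [aLoop2_eq rest c0 pvD0,
        PySem.List.foldl_ite_eq_foldl_filter (fun p : Char × Char => p.1 = p.2)
          (fun d p => PySem.Dict.modify d [p.2] 0 (· + 1))]
    have hfold :
        List.foldl (fun d (p : Char × Char) => PySem.Dict.modify d [p.2] 0 (· + 1)) pvD0
            (List.filter (fun p => decide (p.1 = p.2)) ((c0 :: rest).zip rest))
          = List.foldl (fun d x => PySem.Dict.modify d x 0 (· + 1)) pvD0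
              ((eqSeconds (c0 :: rest)).map (fun k => [k])) := by
      unfold eqSeconds
      rw [List.map_map, List.foldl_map]
      rfl
    rw [hfold]
    set L := (eqSeconds (c0 :: rest)).map (fun k => [k]) with hL
    set final := List.foldl (fun d x => PySem.Dict.modify d x 0 (· + 1)) pvD0 L with hfinal
    have hLsub : ∀ x ∈ L, x ∈ pvD0.keys := by
      intro x hx
      rcases List.mem_map.mp hx with ⟨k, hk, rfl⟩
      rw [pvD0_keys]
      exact List.mem_map.mpr ⟨k, hd _ (List.mem_of_mem_drop (mem_eqSeconds hk)), rfl⟩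
    have hkeys : final.keys = pvD0.keys := by
      rw [hfinal, PySem.Dict.keys_foldl_modify]
      exact pvSetUpdate_subset L pvD0.keys hLsub
    have hvals : final.values = pvD0.keys.map (fun k => final.getD k 0) := by
      rw [PySem.Dict.values_eq_map_keys final (by rw [hkeys]; exact pvD0_keys_nodup) 0, hkeys]
    have hgetD : ∀ c ∈ DIGITS, final.getD [c] 0 = ((eqSeconds (c0 :: rest)).count c : Int) := by
      intro c hcD
      rw [hfinal, PySem.Dict.getD_foldl_modify_add_one L pvD0 [c], pvD0_getD c hcD, hL]
      have hcm : List.count [c] (List.map (fun k => [k]) (eqSeconds (c0 :: rest)))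
          = List.count c (eqSeconds (c0 :: rest)) :=
        List.count_map_of_injective (eqSeconds (c0 :: rest)) (fun k : Char => [k])
          (fun a b h => by simpa using h) c
      rw [hcm]
      ring
    rw [decide_eq_true_iff, hvals]
    have hAiff : ((1 : Int) ∈ pvD0.keys.map (fun k => final.getD k 0)) ↔
        ∃ c ∈ DIGITS, (eqSeconds (c0 :: rest)).count c = 1 := by
      rw [pvD0_keys, List.map_map, List.mem_map]
      constructor
      · rintro ⟨c, hcD, hc⟩
        simp only [Function.comp] at hc
        rw [hgetD c hcD] at hc
        exact ⟨c, hcD, by exact_mod_cast hc⟩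
      · rintro ⟨c, hcD, hc⟩
        exact ⟨c, hcD, by simp only [Function.comp]; rw [hgetD c hcD, hc]; norm_num⟩
    rw [hAiff, runs_eq, List.any_eq_true]
    rw [bridge (c0 :: rest) hd hsort]
    constructor
    · rintro ⟨p, hp', h2⟩; exact ⟨p, hp', by simpa using h2⟩
    · rintro ⟨p, hp', h2⟩; exact ⟨p, hp', by simpa using h2⟩
  · -- not sorted: both return false
    rw [if_neg (fun h => hsort ((phase1_iff cs hd).mp h)),
        if_pos (fun h => hsort ((sorted_self_iff cs).mp h))]
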